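-- pv_equiv track=rewrite | github.com/c-hydro/hmc | hmc/generic_toolkit/namelist/lib_namelist_utils.py | filter_settings
-- ===== SOURCE A (Python) =====
-- from typing import Tuple, List
--
-- def filter_settings(file_stream: str, file_comment: str = '!') -> Tuple[List[str], List[str]]:
--     """
--     Filter comments from a file stream.
--     :param file_stream:
--     :param file_comment:
--     :return: settings_lines, comments_line
--     """
--     settings_lines, comments_lines = [], []
--     for line in file_stream.split('\n'):
--         if line.strip().startswith(file_comment):
--             comments_lines.append(line)
--         else:
--             settings_lines.append(line)
--
--     return settings_lines, comments_lines
-- ===== SOURCE B (Python) =====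
-- from typing import Tuple, List
--
-- def filter_settings(file_stream: str, file_comment: str = '!') -> Tuple[List[str], List[str]]:
--     # Single streaming pass over the characters: build each line in a buffer and
--     # dispatch it the moment its terminating '\n' is seen (no intermediate list
--     # of lines from str.split).
--     settings_lines, comments_lines = [], []
--     buf = ''
--     for ch in file_stream:
--         if ch == '\n':
--             if buf.strip().startswith(file_comment):
--                 comments_lines.append(buf)
--             else:
--                 settings_lines.append(buf)
--             buf = ''
--         else:
--             buf += ch
--     if buf.strip().startswith(file_comment):
--         comments_lines.append(buf)
--     else:
--         settings_lines.append(buf)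
--     return settings_lines, comments_lines
-- ===== Notes on version B (the rewrite author's own statement) =====
-- stated objective: alternative
-- what changed: Replaces splitting the stream into a list of lines and then looping over that list with a single character-level streaming pass that builds each line in a buffer and dispatches it to the right list when its terminating newline is seen, so no intermediate list of lines is ever materialised.
import Mathlib
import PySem

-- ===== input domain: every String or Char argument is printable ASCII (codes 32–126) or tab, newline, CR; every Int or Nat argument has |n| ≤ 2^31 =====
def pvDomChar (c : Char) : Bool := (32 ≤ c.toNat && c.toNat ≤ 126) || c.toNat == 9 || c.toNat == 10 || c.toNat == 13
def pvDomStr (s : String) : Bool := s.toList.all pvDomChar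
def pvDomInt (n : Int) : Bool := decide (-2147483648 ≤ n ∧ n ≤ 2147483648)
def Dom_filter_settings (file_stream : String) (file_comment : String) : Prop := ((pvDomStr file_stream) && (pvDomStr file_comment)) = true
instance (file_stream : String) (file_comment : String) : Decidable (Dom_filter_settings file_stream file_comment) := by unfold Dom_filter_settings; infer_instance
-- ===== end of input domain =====

-- B replaces split-then-partition with a single character-level streaming pass that
-- dispatches each line as its newline is found (objective: alternative, same cost).

-- ===== PORT A =====
-- literal transliteration: split on '\n', then one loop over the lines appending each
-- to one of two accumulator lists according to line.strip().startswith(file_comment)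
def filter_settings (file_stream : String) (file_comment : String) : List String × List String :=
  ((PySem.Str.split? file_stream "\n").getD []).foldl
    (fun sc line =>
      if PySem.Str.startswith (PySem.Str.strip line) file_comment then
        (sc.1, sc.2 ++ [line])
      else
        (sc.1 ++ [line], sc.2))
    ([], [])

-- ===== PORT B =====
-- Source B's per-character step: the Python str buffer is represented exactly by its list
-- of code points (built by += at the end, flushed to a String when dispatched)
def pvStepB (file_comment : String) (st : List String × List String × List Char)
    (ch : Char) : List String × List String × List Char :=
  if ch = '\n' then
    let line := String.ofList st.2.2
    if PySem.Str.startswith (PySem.Str.strip line) file_comment then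
      (st.1, st.2.1 ++ [line], [])
    else
      (st.1 ++ [line], st.2.1, [])
  else
    (st.1, st.2.1, st.2.2 ++ [ch])

-- literal transliteration of Source B: fold the step over the characters, then flush the
-- final buffer with the same classification
def filter_settings_alt (file_stream : String) (file_comment : String) : List String × List String :=
  let st := file_stream.toList.foldl (pvStepB file_comment) ([], [], [])
  let line := String.ofList st.2.2
  if PySem.Str.startswith (PySem.Str.strip line) file_comment then
    (st.1, st.2.1 ++ [line])
  else
    (st.1 ++ [line], st.2.1)

-- ===== PRECONDITION & SPEC =====
def Spec_filter_settings (file_stream : String) (file_comment : String) (out : List String × List String) : Prop := out = filter_settings_alt file_stream file_comment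
instance (file_stream : String) (file_comment : String) (out : List String × List String) : Decidable (Spec_filter_settings file_stream file_comment out) := by unfold Spec_filter_settings; infer_instance

-- ===== CLAIM (what is proved, stated in full; the proofs are below) =====
def Claim_equal_filter_settings : Prop := ∀ (file_stream : String) (file_comment : String), Dom_filter_settings file_stream file_comment → Spec_filter_settings file_stream file_comment (filter_settings file_stream file_comment)

-- ===== LEMMAS AND PROOFS =====

-- reference line-splitter (proof-only): the lines of a char stream, with `buf` the
-- partial line carried in
def pvLinesAcc (buf : List Char) : List Char → List (List Char)
  | [] => [buf]
  | c :: rest => if c = '\n' then buf :: pvLinesAcc [] rest else pvLinesAcc (buf ++ [c]) rest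

-- A's partitioning foldl, from any accumulators, appends the two filters
theorem pv_foldl_partition (p : String → Bool) (L : List String) (s0 c0 : List String) :
    L.foldl (fun sc line => if p line then (sc.1, sc.2 ++ [line]) else (sc.1 ++ [line], sc.2)) (s0, c0)
      = (s0 ++ L.filter (fun l => !p l), c0 ++ L.filter p) := by
  induction L generalizing s0 c0 with
  | nil => simp
  | cons x xs ih =>
    by_cases h : p x = true <;> simp [List.foldl_cons, h, ih]

-- PySem's fuel-based splitter on the single-char separator '\n' computes pvLinesAcc
theorem pv_splitOn_go_newline (fuel : Nat) (l cur : List Char) (acc : List (List Char))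
    (h : l.length ≤ fuel) :
    PySem.Chars.splitOn.go ['\n'] fuel l cur acc = acc.reverse ++ pvLinesAcc cur.reverse l := by
  induction fuel generalizing l cur acc with
  | zero =>
    have : l = [] := by cases l <;> simp_all
    subst this
    simp [PySem.Chars.splitOn.go, pvLinesAcc]
  | succ n ih =>
    cases l with
    | nil => simp [PySem.Chars.splitOn.go, pvLinesAcc]
    | cons c rest =>
      have hr : rest.length ≤ n := by simpa using h
      by_cases hc : c = '\n'
      · subst hc
        simp [PySem.Chars.splitOn.go, List.isPrefixOf, ih _ _ _ hr, pvLinesAcc]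
      · have hpre : (['\n'].isPrefixOf (c :: rest)) = false := by
          simp [List.isPrefixOf]
          exact fun h' => (hc h'.symm).elim
        simp [PySem.Chars.splitOn.go, hpre, ih _ _ _ hr, pvLinesAcc, hc]

theorem pv_splitOn_newline (s : List Char) :
    PySem.Chars.splitOn s ['\n'] = pvLinesAcc [] s := by
  unfold PySem.Chars.splitOn
  rw [pv_splitOn_go_newline _ _ _ _ (by omega)]
  simp

-- B's char fold followed by the final flush partitions the lines of pvLinesAcc
-- (stated for an abstract line predicate p so that simp's Str→Chars bridges keep out)
theorem pv_B_run (p : String → Bool) (chars : List Char) (s0 c0 : List String) (buf : List Char) :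
    (let st := chars.foldl
        (fun st ch =>
          if ch = '\n' then
            if p (String.ofList st.2.2) then (st.1, st.2.1 ++ [String.ofList st.2.2], [])
            else (st.1 ++ [String.ofList st.2.2], st.2.1, [])
          else (st.1, st.2.1, st.2.2 ++ [ch]))
        (s0, c0, buf)
     if p (String.ofList st.2.2) then (st.1, st.2.1 ++ [String.ofList st.2.2])
     else (st.1 ++ [String.ofList st.2.2], st.2.1))
    = (s0 ++ ((pvLinesAcc buf chars).map String.ofList).filter (fun l => !p l),
       c0 ++ ((pvLinesAcc buf chars).map String.ofList).filter p) := by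
  induction chars generalizing s0 c0 buf with
  | nil =>
    by_cases h : p (String.ofList buf) = true <;> simp [pvLinesAcc, h]
  | cons c rest ih =>
    by_cases hc : c = '\n'
    · subst hc
      by_cases h : p (String.ofList buf) = true <;>
        simp [pvLinesAcc, h, ih]
    · simp [pvLinesAcc, hc, ih]

-- ===== VERDICT (by name: the statement is the Claim_ definition above) =====
theorem filter_settings_spec : Claim_equal_filter_settings := by
  intro fs fc _
  unfold Spec_filter_settings filter_settings filter_settings_alt
  have hsplit : (PySem.Str.split? fs "\n").getD []
      = (pvLinesAcc [] fs.toList).map String.ofList := by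
    simp [PySem.Str.split?, PySem.Chars.split?, pv_splitOn_newline]
  rw [hsplit, pv_foldl_partition]
  exact (pv_B_run (fun l => PySem.Str.startswith (PySem.Str.strip l) fc) fs.toList [] [] []).symm
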